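-- pv_equiv track=rewrite | github.com/BrentBrown/painting-recipes | .opencode/skills/transcript-to-recipe/scripts/convert_all_recipes.py | build_wf_reverse_lookup
-- ===== SOURCE A (Python) =====
-- NO_EQ = "No equivalent"
--
-- def build_wf_reverse_lookup(paints: dict) -> dict:
--     wf_table = paints.get("Warpaints Fanatic", {})
--     reverse: dict[str, list[str]] = {}
--     for wf_name, entry in wf_table.items():
--         cit = entry.get("citadel")
--         if cit and cit != NO_EQ:
--             reverse.setdefault(cit, []).append(wf_name)
--     return {cit: " / ".join(names) for cit, names in reverse.items()}
-- ===== SOURCE B (Python) =====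
-- NO_EQ = "No equivalent"
--
-- def build_wf_reverse_lookup(paints: dict) -> dict:
--     wf_table = paints.get("Warpaints Fanatic", {})
--     raw = [(e.get("citadel"), n) for n, e in wf_table.items()]
--     pairs = [(c, n) for c, n in raw if c and c != NO_EQ]
--     out = {}
--     while pairs:
--         k = pairs[0][0]
--         out[k] = " / ".join(n for c, n in pairs if c == k)
--         pairs = [(c, n) for c, n in pairs if c != k]
--     return out
-- ===== Notes on version B (the rewrite author's own statement) =====
-- stated objective: alternative
-- what changed: Replaces the dict-of-lists accumulation (setdefault+append then a join comprehension) by a recursive partition: repeatedly take the first remaining citadel key, join all names matching it, and recurse on the pairs with that key removed; no grouping dict is built.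
import Mathlib
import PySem

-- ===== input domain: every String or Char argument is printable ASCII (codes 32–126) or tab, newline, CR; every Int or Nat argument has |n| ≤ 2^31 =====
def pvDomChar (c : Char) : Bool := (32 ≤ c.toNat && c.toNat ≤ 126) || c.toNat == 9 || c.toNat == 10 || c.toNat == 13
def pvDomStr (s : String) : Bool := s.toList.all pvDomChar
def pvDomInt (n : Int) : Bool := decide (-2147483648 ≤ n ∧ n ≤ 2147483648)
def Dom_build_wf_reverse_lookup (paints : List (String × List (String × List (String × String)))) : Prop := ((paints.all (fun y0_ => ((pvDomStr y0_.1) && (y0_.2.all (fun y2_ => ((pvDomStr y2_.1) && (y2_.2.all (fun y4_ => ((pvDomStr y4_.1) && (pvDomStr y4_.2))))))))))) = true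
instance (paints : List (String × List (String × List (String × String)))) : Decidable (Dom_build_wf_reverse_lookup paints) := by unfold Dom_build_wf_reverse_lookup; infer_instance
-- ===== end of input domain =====

-- B replaces A's dict-of-lists accumulation by a recursive partition on the first remaining
-- citadel key (join its names, drop them, recurse) — alternative decomposition, same result.

def NO_EQ : String := "No equivalent"

-- ===== PORT A =====
def build_wf_reverse_lookup (paints : List (String × List (String × List (String × String)))) : List (String × String) :=
  let wf_table := (PySem.Dict.mk paints).getD "Warpaints Fanatic" []
  let reverse : PySem.Dict String (List String) :=
    wf_table.foldl (fun rev p =>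
      match (PySem.Dict.mk p.2).get? "citadel" with
      | some c => if c != "" && c != NO_EQ then rev.modify c [] (fun ls => ls ++ [p.1]) else rev
      | none => rev) PySem.Dict.empty
  reverse.items.map (fun q => (q.1, PySem.Str.join " / " q.2))

-- ===== PORT B =====
-- the while loop of Source B: peel off the first key, join its names, recurse on the rest
def bwfGroup : List (String × String) → List (String × String)
  | [] => []
  | l@((k, _) :: t) =>
      (k, PySem.Str.join " / " ((l.filter (fun q => q.1 == k)).map (fun q => q.2))) ::
      bwfGroup (t.filter (fun q => q.1 != k))
termination_by l => l.length
decreasing_by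
  simp only [List.length_cons, List.length_unattach]
  exact Nat.lt_succ_of_le (le_trans (List.length_filter_le _ _) (by simp))

def build_wf_reverse_lookup_alt (paints : List (String × List (String × List (String × String)))) : List (String × String) :=
  let wf_table := (PySem.Dict.mk paints).getD "Warpaints Fanatic" []
  let raw : List (Option String × String) :=
    wf_table.map (fun p => ((PySem.Dict.mk p.2).get? "citadel", p.1))
  let pairs : List (String × String) :=
    raw.filterMap (fun q =>
      match q.1 with
      | some c => if c != "" && c != NO_EQ then some (c, q.2) else none
      | none => none)
  bwfGroup pairs

-- ===== PRECONDITION & SPEC =====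
def Spec_build_wf_reverse_lookup (paints : List (String × List (String × List (String × String)))) (out : List (String × String)) : Prop := out = build_wf_reverse_lookup_alt paints
instance (paints : List (String × List (String × List (String × String)))) (out : List (String × String)) : Decidable (Spec_build_wf_reverse_lookup paints out) := by unfold Spec_build_wf_reverse_lookup; infer_instance

-- ===== CLAIM (what is proved, stated in full; the proofs are below) =====
def Claim_equal_build_wf_reverse_lookup : Prop := ∀ (paints : List (String × List (String × List (String × String)))), Dom_build_wf_reverse_lookup paints → Spec_build_wf_reverse_lookup paints (build_wf_reverse_lookup paints)

-- ===== LEMMAS AND PROOFS =====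

-- A's conditional fold over the table equals the plain modify-fold over the extracted pairs.
theorem foldl_step_eq_foldl_filterMap (l : List (String × List (String × String)))
    (d : PySem.Dict String (List String)) :
    l.foldl (fun rev p =>
      match (PySem.Dict.mk p.2).get? "citadel" with
      | some c => if c != "" && c != NO_EQ then rev.modify c [] (fun ls => ls ++ [p.1]) else rev
      | none => rev) d
    = (l.filterMap (fun p =>
        match (PySem.Dict.mk p.2).get? "citadel" with
        | some c => if c != "" && c != NO_EQ then some (c, p.1) else none
        | none => none)).foldl (fun rev q => rev.modify q.1 [] (fun ls => ls ++ [q.2])) d := by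
  induction l generalizing d with
  | nil => rfl
  | cons h t ih =>
    simp only [List.foldl_cons, List.filterMap_cons]
    cases hc : (PySem.Dict.mk h.2).get? "citadel" with
    | none => exact ih d
    | some c =>
      by_cases hk : (c != "" && c != NO_EQ) = true
      · simp only [if_pos hk, List.foldl_cons]; exact ih _
      · simp only [if_neg hk]; exact ih d

-- foldl Set.add from any accumulator: elements already present are dropped, the rest appended
theorem foldl_set_add_acc (n : ℕ) : ∀ (l : List String), l.length ≤ n → ∀ (acc : List String),
    List.foldl PySem.Set.add acc l
    = acc ++ List.foldl PySem.Set.add [] (l.filter (fun x => !acc.contains x)) := by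
  induction n with
  | zero =>
    intro l hl acc
    interval_cases hlen : l.length
    · rw [List.length_eq_zero_iff.mp hlen]; simp
  | succ m ih =>
    intro l hl acc
    cases l with
    | nil => simp
    | cons x t =>
      have ht : t.length ≤ m := by simp only [List.length_cons] at hl; omega
      simp only [List.foldl_cons, List.filter_cons]
      by_cases hx : acc.contains x = true
      · have h1 : PySem.Set.add acc x = acc := by unfold PySem.Set.add PySem.Set.contains; rw [if_pos hx]
        have h2 : (!acc.contains x) = false := by rw [hx]; rfl
        rw [h1, h2]
        simp only [Bool.false_eq_true, if_false]
        exact ih t ht acc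
      · have hxf : acc.contains x = false := by
          cases h : acc.contains x
          · rfl
          · exact absurd h hx
        have h1 : PySem.Set.add acc x = acc ++ [x] := by unfold PySem.Set.add PySem.Set.contains; rw [if_neg hx]
        have h2 : (!acc.contains x) = true := by rw [hxf]; rfl
        rw [h1, h2, if_pos rfl, List.foldl_cons]
        have h3 : PySem.Set.add ([] : List String) x = [x] := by
          unfold PySem.Set.add; rfl
        rw [h3, ih t ht (acc ++ [x]),
          ih (t.filter (fun y => !acc.contains y)) (le_trans (List.length_filter_le _ _) ht) [x],
          List.append_assoc]
        congr 2
        rw [List.filter_filter]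
        congr 1
        apply List.filter_congr
        intro y _
        simp [Bool.not_or, Bool.and_comm]

-- dedup peels its head: dedup (k :: l) = k :: dedup (l with k removed)
theorem dedup_cons_eq (k : String) (l : List String) :
    PySem.List.dedup (k :: l) = k :: PySem.List.dedup (l.filter (fun y => y != k)) := by
  show List.foldl PySem.Set.add PySem.Set.empty (k :: l) = _
  have h0 : PySem.Set.add PySem.Set.empty k = [k] := by simp [PySem.Set.add, PySem.Set.empty]
  simp only [List.foldl_cons, h0]
  rw [foldl_set_add_acc l.length l le_rfl [k]]
  have : (l.filter (fun x => !([k] : List String).contains x)) = l.filter (fun y => y != k) := by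
    apply List.filter_congr; intro y _; simp [bne, beq_eq_decide]
  rw [this]
  rfl

-- bwfGroup computes the first-occurrence-keyed grouping
theorem bwfGroup_eq_dedup_map (n : ℕ) : ∀ (g : List (String × String)), g.length ≤ n →
    bwfGroup g = (PySem.List.dedup (g.map (fun x => x.1))).map
      (fun k => (k, PySem.Str.join " / " ((g.filter (fun q => q.1 == k)).map (fun x => x.2)))) := by
  induction n with
  | zero =>
    intro g hg
    have : g = [] := List.length_eq_zero_iff.mp (Nat.le_zero.mp hg)
    subst this
    rw [bwfGroup]
    rfl
  | succ m ih =>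
    intro g hg
    cases g with
    | nil => rw [bwfGroup]; rfl
    | cons h t =>
      obtain ⟨k, nm⟩ := h
      rw [bwfGroup]
      simp only [List.map_cons]
      rw [dedup_cons_eq, List.map_cons]
      congr 1
      have ht : (t.filter (fun q => q.1 != k)).length ≤ m := by
        have := List.length_filter_le (fun q => q.1 != k) t
        simp only [List.length_cons] at hg
        omega
      rw [ih _ ht]
      have hkeys : (t.map (fun x => x.1)).filter (fun y => y != k)
          = (t.filter (fun q => q.1 != k)).map (fun x => x.1) := by
        rw [List.filter_map]; rfl
      rw [hkeys]
      apply List.map_congr_left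
      intro k' hk'
      have hk'mem : k' ∈ (t.filter (fun q => q.1 != k)).map (fun x => x.1) := by
        simpa [PySem.List.mem_dedup] using hk'
      have hne : (k' == k) = false := by
        rcases List.mem_map.mp hk'mem with ⟨q, hq, rfl⟩
        have := (List.mem_filter.mp hq).2
        simpa [bne] using this
      congr 1
      have h1 : ((k, nm) :: t).filter (fun q => q.1 == k') = t.filter (fun q => q.1 == k') := by
        simp only [List.filter_cons]
        have : ((k, nm).1 == k') = false := by
          cases hkk : (k == k')
          · simp
          · exact absurd (by simpa [eq_comm] using (beq_iff_eq.mp hkk)) (by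
              intro h; rw [h] at hne; simp at hne)
        simp [this]
      have h2 : (t.filter (fun q => q.1 != k)).filter (fun q => q.1 == k')
          = t.filter (fun q => q.1 == k') := by
        rw [List.filter_filter]
        apply List.filter_congr
        intro q _
        cases hq : (q.1 == k')
        · simp
        · have : (q.1 != k) = true := by
            have : q.1 = k' := beq_iff_eq.mp hq
            simp [bne, this]
            intro hh; rw [hh] at hne; simp at hne
          simp [this]
      rw [h1, h2]

-- ===== VERDICT (by name: the statement is the Claim_ definition above) =====
theorem build_wf_reverse_lookup_spec : Claim_equal_build_wf_reverse_lookup := by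
  intro paints _
  simp only [Spec_build_wf_reverse_lookup, build_wf_reverse_lookup, build_wf_reverse_lookup_alt]
  rw [foldl_step_eq_foldl_filterMap]
  rw [List.filterMap_map]
  have hcomp : ((fun q : Option String × String =>
      match q.1 with
      | some c => if c != "" && c != NO_EQ then some (c, q.2) else none
      | none => none) ∘ (fun p : String × List (String × String) =>
        ((PySem.Dict.mk p.2).get? "citadel", p.1)))
    = (fun p : String × List (String × String) =>
      match (PySem.Dict.mk p.2).get? "citadel" with
      | some c => if c != "" && c != NO_EQ then some (c, p.1) else none
      | none => none) := rfl
  rw [hcomp]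
  set good := ((PySem.Dict.mk paints).getD "Warpaints Fanatic" []).filterMap (fun p =>
      match (PySem.Dict.mk p.2).get? "citadel" with
      | some c => if c != "" && c != NO_EQ then some (c, p.1) else none
      | none => none) with hgood
  have hnd : (good.foldl (fun rev q => rev.modify q.1 [] (fun ls => ls ++ [q.2]))
      (PySem.Dict.empty : PySem.Dict String (List String))).keys.Nodup :=
    PySem.Dict.nodup_keys_foldl_modify_key good (fun q => q.1) []
      (fun _ q ls => ls ++ [q.2]) PySem.Dict.empty (by simp)
  rw [PySem.Dict.items_eq_map_keys _ hnd [],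
    PySem.Dict.keys_foldl_modify_key good (fun q => q.1) [] (fun _ q ls => ls ++ [q.2])]
  simp only [List.map_map, PySem.Dict.keys_empty]
  rw [bwfGroup_eq_dedup_map good.length good le_rfl]
  have hkeys : PySem.Set.update ([] : List String) (good.map (fun q => q.1))
      = PySem.List.dedup (good.map (fun x => x.1)) := rfl
  rw [hkeys]
  apply List.map_congr_left
  intro k _
  simp only [Function.comp_apply]
  rw [PySem.Dict.getD_foldl_modify_append]
  simp
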